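-- pv_equiv track=rewrite | github.com/koobzaar/The-Machine | scripts/rom_text_codec.py | pad_to_width
-- ===== SOURCE A (Python) =====
-- def empty_mask(width: int = 8) -> list[list[int]]:
--     return [[0] * width for _ in range(8)]
--
-- def copy_mask(mask: list[list[int]]) -> list[list[int]]:
--     return [row[:] for row in mask]
--
-- def pad_to_width(mask: list[list[int]], width: int) -> list[list[int]]:
--     current = len(mask[0])
--     if current >= width:
--         return copy_mask(mask)
--     left = (width - current) // 2
--     padded = empty_mask(width)
--     for y in range(8):
--         for x in range(current):
--             padded[y][left + x] = mask[y][x]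
--     return padded
-- ===== SOURCE B (Python) =====
-- def pad_to_width(mask: list[list[int]], width: int) -> list[list[int]]:
--     current = len(mask[0])
--     if current >= width:
--         return [row[:] for row in mask]
--     left = (width - current) // 2
--     right = width - current - left
--     return [[0] * left + row[:] + [0] * right for row in mask]
-- ===== Notes on version B (the rewrite author's own statement) =====
-- stated objective: simpler
-- what changed: Instead of pre-allocating an 8-row zero matrix and overwriting cells with a nested index loop, B builds each output row directly in one pass as [0]*left + row[:] + [0]*right by list concatenation.
-- outside the precondition, e.g. on pad_to_width([[]], 1): A returns [[0], [0], [0], [0], [0], [0], [0], [0]], B returns [[0]]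
import Mathlib
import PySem

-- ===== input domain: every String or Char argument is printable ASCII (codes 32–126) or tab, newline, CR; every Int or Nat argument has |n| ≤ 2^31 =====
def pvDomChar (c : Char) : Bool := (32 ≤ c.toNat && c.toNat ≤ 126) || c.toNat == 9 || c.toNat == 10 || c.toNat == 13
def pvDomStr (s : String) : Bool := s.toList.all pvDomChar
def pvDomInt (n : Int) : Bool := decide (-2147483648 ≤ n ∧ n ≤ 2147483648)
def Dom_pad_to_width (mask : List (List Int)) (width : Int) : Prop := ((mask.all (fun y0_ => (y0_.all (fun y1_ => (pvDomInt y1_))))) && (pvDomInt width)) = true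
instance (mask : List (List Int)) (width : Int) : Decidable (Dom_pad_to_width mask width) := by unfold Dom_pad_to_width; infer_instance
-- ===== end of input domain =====

-- B builds each padded row in one pass by concatenation ([0]*left + row + [0]*right)
-- instead of A's pre-allocated 8×width zero matrix overwritten by a nested index loop (objective: simpler).

-- ===== PORT A =====
-- [[0] * width for _ in range(8)]  ([0]*width is empty for width < 0, hence .toNat)
def empty_mask (width : Int) : List (List Int) :=
  (PySem.List.pyRange 0 8 1).map (fun _ => List.replicate width.toNat (0 : Int))

-- [row[:] for row in mask]  (row[:] copies; on immutable Lean lists it is the row itself)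
def copy_mask (mask : List (List Int)) : List (List Int) :=
  mask.map (fun row => row)

-- current = len(mask[0]) raises IndexError on mask = []; Pre_ excludes that, so headD [] is exact there.
-- padded[y][left+x] = mask[y][x]: under Pre_ every index is in range, so modify/set/getD are exact.
def pad_to_width (mask : List (List Int)) (width : Int) : List (List Int) :=
  let current : Int := ((mask.headD []).length : Int)
  if width ≤ current then
    copy_mask mask
  else
    let left := PySem.Int.floordiv (width - current) 2
    let padded := empty_mask width
    (PySem.List.pyRange 0 8 1).foldl (fun p y =>
      (PySem.List.pyRange 0 current 1).foldl (fun q x =>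
        q.modify y.toNat (fun row =>
          row.set (left + x).toNat (PySem.List.pyGetD (PySem.List.pyGetD mask y []) x 0))) p)
      padded

-- ===== PORT B =====
def pad_to_width_alt (mask : List (List Int)) (width : Int) : List (List Int) :=
  let current : Int := ((mask.headD []).length : Int)
  if width ≤ current then
    mask.map (fun row => row)
  else
    let left := PySem.Int.floordiv (width - current) 2
    let right := width - current - left
    mask.map (fun row =>
      List.replicate left.toNat (0 : Int) ++ row ++ List.replicate right.toNat (0 : Int))

-- ===== PRECONDITION & SPEC =====
-- Pre_ excludes the empty mask (A raises IndexError on mask[0]) and, when padding is needed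
-- (len(mask[0]) < width), masks that are not exactly 8 rows of the width of row 0: there A's
-- hardcoded range(8)/range(current) loops either raise IndexError or silently drop rows past the
-- eighth and cells past column current — an artefact of A's fixed 8×width pre-allocation.
def Pre_pad_to_width (mask : List (List Int)) (width : Int) : Prop :=
  mask ≠ [] ∧
    (width ≤ ((mask.headD []).length : Int) ∨
      (mask.length = 8 ∧ ∀ r ∈ mask, r.length = (mask.headD []).length))
instance (mask : List (List Int)) (width : Int) : Decidable (Pre_pad_to_width mask width) := by
  unfold Pre_pad_to_width; infer_instance

def pvWitness_pad_to_width : List (List Int) × Int :=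
  ([[1], [0], [1], [0], [1], [0], [1], [0]], 3)

def Spec_pad_to_width (mask : List (List Int)) (width : Int) (out : List (List Int)) : Prop := out = pad_to_width_alt mask width
instance (mask : List (List Int)) (width : Int) (out : List (List Int)) : Decidable (Spec_pad_to_width mask width out) := by unfold Spec_pad_to_width; infer_instance

-- ===== CLAIM (what is proved, stated in full; the proofs are below) =====
def Claim_equal_pad_to_width : Prop := ∀ (mask : List (List Int)) (width : Int), Dom_pad_to_width mask width → Pre_pad_to_width mask width → Spec_pad_to_width mask width (pad_to_width mask width)

-- ===== LEMMAS AND PROOFS =====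

-- two modifies at the same index compose
theorem pv_modify_comp {α : Type} (p : List α) (k : Nat) (f g : α → α) :
    (p.modify k f).modify k g = p.modify k (fun a => g (f a)) := by
  apply List.ext_getElem?
  intro i
  simp only [List.getElem?_modify]
  cases p[i]? with
  | none => rfl
  | some a => by_cases h : k = i <;> simp [h]

-- a fold of modifies at one fixed index is one modify by the folded function
theorem pv_foldl_modify {α β : Type} (l : List β) (k : Nat) (g : β → α → α) (p : List α) :
    l.foldl (fun q x => q.modify k (g x)) p
      = p.modify k (fun a => l.foldl (fun a x => g x a) a) := by
  induction l generalizing p with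
  | nil => exact (List.modify_id k p).symm
  | cons x l ih => rw [List.foldl_cons, ih, pv_modify_comp]; rfl

-- a fold of sets preserves the length
theorem pv_length_foldl_set {α : Type} (l : List Nat) (idx : Nat → Nat) (v : Nat → α)
    (p : List α) :
    (l.foldl (fun q k => q.set (idx k) (v k)) p).length = p.length := by
  induction l generalizing p with
  | nil => rfl
  | cons x l ih => rw [List.foldl_cons, ih, List.length_set]

-- element view of the inner loop: write v-values at offsets L, L+1, …, L+c-1
theorem pv_foldl_set_getElem? {α : Type} (L : Nat) (v : Nat → α) :
    ∀ (c : Nat) (p : List α) (j : Nat),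
      ((List.range c).foldl (fun q k => q.set (L + k) (v k)) p)[j]?
        = if L ≤ j ∧ j < L + c ∧ j < p.length then some (v (j - L)) else p[j]? := by
  intro c
  induction c with
  | zero =>
    intro p j
    rw [List.range_zero, List.foldl_nil, if_neg (by omega)]
  | succ c ih =>
    intro p j
    rw [List.range_succ, List.foldl_append, List.foldl_cons, List.foldl_nil,
      List.getElem?_set, pv_length_foldl_set, ih]
    by_cases hj1 : L + c = j
    · rw [if_pos hj1]
      by_cases hj2 : j < p.length
      · rw [if_pos (by omega), if_pos ⟨by omega, by omega, hj2⟩,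
          show j - L = c by omega]
      · rw [if_neg (by omega), if_neg (by omega),
          List.getElem?_eq_none (by omega)]
    · rw [if_neg hj1]
      by_cases hcnd : L ≤ j ∧ j < L + c ∧ j < p.length
      · rw [if_pos hcnd, if_pos ⟨hcnd.1, by omega, hcnd.2.2⟩]
      · rw [if_neg hcnd, if_neg (by omega)]

-- element view of the outer loop: modify index y by f y, for y = 0, …, m-1
theorem pv_foldl_range_modify_getElem? {α : Type} (f : Nat → α → α) :
    ∀ (m : Nat) (p : List α) (j : Nat),
      ((List.range m).foldl (fun q y => q.modify y (f y)) p)[j]?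
        = if j < m then (f j) <$> p[j]? else p[j]? := by
  intro m
  induction m with
  | zero => intro p j; rw [List.range_zero, List.foldl_nil, if_neg (by omega)]
  | succ m ih =>
    intro p j
    rw [List.range_succ, List.foldl_append, List.foldl_cons, List.foldl_nil,
      List.getElem?_modify, ih]
    rcases Nat.lt_trichotomy j m with hj | hj | hj
    · rw [if_pos hj, if_pos (by omega)]
      cases p[j]? <;> simp [show ¬ (m = j) by omega]
    · subst hj
      rw [if_neg (by omega), if_pos (by omega)]
      cases p[j]? <;> simp
    · rw [if_neg (by omega), if_neg (by omega)]
      cases p[j]? <;> simp [show ¬ (m = j) by omega]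

-- ===== VERDICT (by name: the statement is the Claim_ definition above) =====
theorem pad_to_width_spec : Claim_equal_pad_to_width := by
  intro mask width _ hpre
  obtain ⟨hne, hbr⟩ := hpre
  by_cases hcw : width ≤ ((mask.headD []).length : Int)
  · simp only [Spec_pad_to_width, pad_to_width, pad_to_width_alt, copy_mask, if_pos hcw]
  · simp only [Spec_pad_to_width, pad_to_width, pad_to_width_alt, if_neg hcw]
    rcases hbr with h | ⟨hm8, hrows⟩
    · exact absurd h hcw
    rw [not_le] at hcw
    set c := (mask.headD []).length with hc
    set ileft := PySem.Int.floordiv (width - (c : Int)) 2 with hileft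
    have hld : ileft = (width - (c : Int)) / 2 :=
      PySem.Int.floordiv_eq_ediv_of_pos (by norm_num)
    have hl0 : 0 ≤ ileft := by rw [hld]; omega
    have hlc : ileft ≤ width - (c : Int) := by rw [hld]; omega
    set L := ileft.toNat with hLdef
    have hL : (L : Int) = ileft := Int.toNat_of_nonneg hl0
    set iright := width - (c : Int) - ileft with hiright
    have hr0 : 0 ≤ iright := by omega
    set R := iright.toNat with hRdef
    have hR : (R : Int) = iright := Int.toNat_of_nonneg hr0
    set n := width.toNat with hndef
    have hn : (n : Int) = width := Int.toNat_of_nonneg (by omega)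
    have hnLcR : n = L + c + R := by omega
    have hem : empty_mask width = List.replicate 8 (List.replicate n (0 : Int)) := rfl
    rw [hem]
    have hadd : ∀ (a b : Nat), ((a : Int) + (b : Int)).toNat = a + b := by intro a b; omega
    have h8 : ((8 : Int)).toNat = 8 := rfl
    simp only [PySem.List.pyRange_one, List.foldl_map, zero_add, sub_zero,
      Int.toNat_natCast, h8, PySem.List.pyGetD_natCast, ← hL, hadd]
    simp only [pv_foldl_modify]
    apply List.ext_getElem?
    intro i
    rw [pv_foldl_range_modify_getElem?, List.getElem?_map, List.getElem?_replicate]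
    by_cases hi : i < 8
    · have hilt : i < mask.length := by omega
      rw [if_pos hi, if_pos hi, List.getElem?_eq_getElem hilt]
      refine congrArg some ?_
      have hgd : mask.getD i [] = mask[i] := List.getD_eq_getElem mask [] hilt
      have hrlen : (mask[i]).length = c := hrows _ (List.getElem_mem hilt)
      apply List.ext_getElem?
      intro j
      rw [pv_foldl_set_getElem?, hgd]
      rw [List.getElem?_append, List.getElem?_append]
      simp only [List.length_replicate, List.getElem?_replicate, List.length_append, hrlen]
      by_cases hj1 : j < L
      · rw [if_neg (by omega), if_pos (by omega), if_pos (by omega), if_pos hj1, if_pos hj1]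
      · by_cases hj2 : j < L + c
        · rw [if_pos ⟨by omega, by omega, by omega⟩, if_pos (by omega), if_neg hj1,
            List.getElem?_eq_getElem (by omega : j - L < (mask[i]).length),
            List.getD_eq_getElem _ _ (by omega)]
        · by_cases hj3 : j < n
          · rw [if_neg (by omega), if_pos hj3, if_neg (by omega), if_pos (by omega)]
          · rw [if_neg (by omega), if_neg (by omega), if_neg (by omega), if_neg (by omega)]
    · rw [if_neg hi, if_neg hi, List.getElem?_eq_none (show mask.length ≤ i by omega)]
      rfl
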